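-- pv_equiv track=rewrite | github.com/shiannn/LeetCodePython | 816. Ambiguous Coordinates.py | count_decimal_points
-- ===== SOURCE A (Python) =====
-- def count_decimal_points(sub_digits):
--     if len(sub_digits) == 1:
--         return set({sub_digits})
--     else:
--         ### length >= 2
--         if sub_digits[0] == '0' and sub_digits[-1] == '0':
--             return set({})
--         elif sub_digits[0] != '0' and sub_digits[-1] != '0':
--             with_point = set(
--                 {sub_digits[:idx] + '.' + sub_digits[idx:] for idx in range(1, len(sub_digits))}
--             )
--             without_point = set({sub_digits})
--             ret = with_point | without_point
--
--             return ret
--         elif sub_digits[0] == '0' and sub_digits[-1] != '0':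
--             return set({sub_digits[0] + '.' + sub_digits[1:]})
--         elif sub_digits[0] != '0' and sub_digits[-1] == '0':
--             return set({sub_digits})
-- ===== SOURCE B (Python) =====
-- def count_decimal_points(sub_digits):
--     def ok_int(s):
--         return len(s) == 1 or not s.startswith('0')
--     result = set()
--     for i in range(1, len(sub_digits)):
--         left, right = sub_digits[:i], sub_digits[i:]
--         if ok_int(left) and not right.endswith('0'):
--             result.add(left + '.' + right)
--     if ok_int(sub_digits):
--         result.add(sub_digits)
--     return result
-- ===== Notes on version B (the rewrite author's own statement) =====
-- stated objective: simpler
-- what changed: Replaces A's four-way case tree on first/last characters by a generate-and-filter loop: every dotted candidate is kept iff its integer part and fraction part pass two small validity predicates, and the bare string iff it is a valid integer; Pre_ excludes only the empty string, on which A raises IndexError.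
import Mathlib
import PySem

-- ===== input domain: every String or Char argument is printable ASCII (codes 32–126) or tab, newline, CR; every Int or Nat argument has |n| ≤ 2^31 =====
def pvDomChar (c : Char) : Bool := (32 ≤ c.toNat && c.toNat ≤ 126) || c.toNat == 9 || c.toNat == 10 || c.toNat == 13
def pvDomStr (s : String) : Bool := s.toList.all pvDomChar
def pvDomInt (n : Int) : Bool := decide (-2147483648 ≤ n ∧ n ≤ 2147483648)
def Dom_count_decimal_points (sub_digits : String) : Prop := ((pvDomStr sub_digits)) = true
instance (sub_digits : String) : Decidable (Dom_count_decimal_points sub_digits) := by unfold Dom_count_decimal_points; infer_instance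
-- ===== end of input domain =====

-- ===== PORT A =====
-- A: four-way branch on the first and last character; set built from a slice comprehension.
def count_decimal_points (sub_digits : String) : List String :=
  let cs := sub_digits.toList
  if cs.length == 1 then
    PySem.Set.ofList [sub_digits]
  else
    -- length >= 2 (Python comment preserved); sub_digits[0] / sub_digits[-1] as total pyGetD (Pre_ excludes the empty string)
    if (PySem.List.pyGetD cs 0 ' ' == '0') && (PySem.List.pyGetD cs (-1) ' ' == '0') then
      PySem.Set.ofList ([] : List String)
    else if !(PySem.List.pyGetD cs 0 ' ' == '0') && !(PySem.List.pyGetD cs (-1) ' ' == '0') then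
      let with_point := PySem.Set.ofList
        ((PySem.List.pyRange 1 cs.length).map (fun idx =>
          String.ofList (PySem.List.slice cs none (some idx) ++ '.' :: PySem.List.slice cs (some idx) none)))
      let without_point := PySem.Set.ofList [sub_digits]
      PySem.Set.union with_point without_point
    else if (PySem.List.pyGetD cs 0 ' ' == '0') && !(PySem.List.pyGetD cs (-1) ' ' == '0') then
      PySem.Set.ofList [String.ofList (PySem.List.pyGetD cs 0 ' ' :: '.' :: PySem.List.slice cs (some 1) none)]
    else if !(PySem.List.pyGetD cs 0 ' ' == '0') && (PySem.List.pyGetD cs (-1) ' ' == '0') then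
      PySem.Set.ofList [sub_digits]
    else []  -- unreachable: the four conditions are exhaustive

-- ===== PORT B =====
-- B: generate-and-filter — keep sub[:i] + '.' + sub[i:] iff the integer part and the fraction part are valid,
-- and the bare string iff it is a valid integer.
def pvOkInt (cs : List Char) : Bool :=
  cs.length == 1 || !PySem.Chars.startswith cs ['0']

def count_decimal_points_alt (sub_digits : String) : List String :=
  let cs := sub_digits.toList
  let result := (PySem.List.pyRange 1 cs.length).foldl (fun acc i =>
    let left := PySem.List.slice cs none (some i)
    let right := PySem.List.slice cs (some i) none
    if pvOkInt left && !PySem.Chars.endswith right ['0'] then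
      PySem.Set.add acc (String.ofList (left ++ '.' :: right))
    else acc) PySem.Set.empty
  if pvOkInt cs then PySem.Set.add result sub_digits else result

-- ===== PRECONDITION & SPEC =====
-- Pre_ excludes only the empty string, on which A raises IndexError at sub_digits[0].
def Pre_count_decimal_points (sub_digits : String) : Prop := sub_digits ≠ ""
instance (sub_digits : String) : Decidable (Pre_count_decimal_points sub_digits) := by
  unfold Pre_count_decimal_points; infer_instance
def pvWitness_count_decimal_points : String := "105"

def Spec_count_decimal_points (sub_digits : String) (out : List String) : Prop := out = count_decimal_points_alt sub_digits
instance (sub_digits : String) (out : List String) : Decidable (Spec_count_decimal_points sub_digits out) := by unfold Spec_count_decimal_points; infer_instance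

-- ===== CLAIM (what is proved, stated in full; the proofs are below) =====
def Claim_equal_count_decimal_points : Prop := ∀ (sub_digits : String), Dom_count_decimal_points sub_digits → Pre_count_decimal_points sub_digits → Spec_count_decimal_points sub_digits (count_decimal_points sub_digits)

-- ===== LEMMAS AND PROOFS =====

lemma pvStartswithZero (c : Char) (t : List Char) :
    PySem.Chars.startswith (c :: t) ['0'] = (c == '0') := by
  by_cases hc : c = '0'
  · subst hc
    simp [PySem.Chars.startswith_iff, List.cons_prefix_cons]
  · have : ¬ (['0'] <+: (c :: t)) := by
      rw [List.cons_prefix_cons]; rintro ⟨h, -⟩; exact hc h.symm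
    simp [hc, (Bool.eq_false_iff).mpr (fun h => this ((PySem.Chars.startswith_iff _ _).mp h))]

lemma pvEndswithZero (r : List Char) :
    PySem.Chars.endswith r ['0'] = (r.getLast? == some '0') := by
  by_cases h : r.getLast? = some '0'
  · obtain ⟨l, rfl⟩ := List.getLast?_eq_some_iff.mp h
    simp [PySem.Chars.endswith_iff, h]
  · have hs : ¬ (['0'] <:+ r) := by
      rintro ⟨p, rfl⟩; exact h (by simp)
    simp [h, (Bool.eq_false_iff).mpr (fun hb => hs ((PySem.Chars.endswith_iff _ _).mp hb))]

lemma pvOkInt_take (c : Char) (t : List Char) (i : Int) (h1 : 1 ≤ i) (h2 : i ≤ (c :: t).length) :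
    pvOkInt (PySem.List.slice (c :: t) none (some i)) =
      ((i == 1) || !(c == '0')) := by
  rw [PySem.List.slice_to _ (by omega)]
  obtain ⟨k, hk⟩ : ∃ k : Nat, i.toNat = k + 1 := ⟨i.toNat - 1, by omega⟩
  have hkt : k ≤ t.length := by simp at h2; omega
  rw [hk, List.take_succ_cons]
  have hlen : ((c :: List.take k t).length == 1) = (i == 1) := by
    have hkl : (List.take k t).length = k := by simp [hkt]
    by_cases h : i = 1
    · have hk0 : k = 0 := by omega
      simp [h, hk0]
    · have hk1 : k + 1 ≠ 1 := by omega
      simp [List.length_cons, hkl, h]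
      omega
  unfold pvOkInt
  rw [pvStartswithZero, hlen]

lemma pvEndsDrop (cs : List Char) (i : Int) (h1 : 0 ≤ i) (h2 : i < cs.length) :
    PySem.Chars.endswith (PySem.List.slice cs (some i) none) ['0'] = (cs.getLast? == some '0') := by
  rw [PySem.List.slice_from _ h1, pvEndswithZero, List.getLast?_drop]
  have : ¬ (cs.length ≤ i.toNat) := by omega
  simp [this]

-- ===== VERDICT (by name: the statement is the Claim_ definition above) =====
theorem count_decimal_points_spec : Claim_equal_count_decimal_points := by
  intro s _ hPre
  unfold Spec_count_decimal_points count_decimal_points count_decimal_points_alt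
  rcases hL : s.toList with _ | ⟨c, t⟩
  · exact absurd (String.toList_eq_nil_iff.mp hL) hPre
  rcases t with _ | ⟨c2, t2⟩
  · -- length 1
    simp [PySem.List.pyRange, pvOkInt, PySem.Set.ofList, PySem.Set.add, PySem.Set.contains,
      PySem.Set.empty]
  · -- length ≥ 2
    have hne : (c :: c2 :: t2) ≠ ([] : List Char) := by simp
    set d := (c :: c2 :: t2).getLast hne with hdd
    have hd? : (c :: c2 :: t2).getLast? = some d := List.getLast?_eq_some_getLast hne
    have hget1 : PySem.List.pyGetD (c :: c2 :: t2) (-1) ' ' = d :=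
      PySem.List.pyGetD_neg_one _ ' ' hne
    have hlen2 : ((c :: c2 :: t2).length == 1) = false := by simp
    have hn : (1 : Int) < ((c :: c2 :: t2).length : Int) := by simp
    have hcondI : ∀ i : Int, 1 ≤ i → i < ((c :: c2 :: t2).length : Int) →
        pvOkInt (PySem.List.slice (c :: c2 :: t2) none (some i)) = ((i == 1) || !(c == '0')) :=
      fun i h1 h2 => pvOkInt_take c (c2 :: t2) i h1 (le_of_lt h2)
    have hcondE : ∀ i : Int, 1 ≤ i → i < ((c :: c2 :: t2).length : Int) →
        PySem.Chars.endswith (PySem.List.slice (c :: c2 :: t2) (some i) none) ['0'] =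
          (d == '0') := by
      intro i h1 h2
      rw [pvEndsDrop _ i (by omega) h2, hd?]
      simp
    have hok : pvOkInt (c :: c2 :: t2) = !(c == '0') := by
      unfold pvOkInt; rw [pvStartswithZero]; simp
    by_cases hc : (c == '0') = true <;> by_cases hdz : (d == '0') = true
    · -- '0' … '0' : A returns {}, B's filter rejects everything
      simp only [hlen2, PySem.List.pyGetD_zero_cons, hget1, hc, hdz, hok, Bool.and_self,
        Bool.not_true, Bool.and_false, reduceIte]
      rw [PySem.List.foldl_congr_mem _ _ (fun acc _ => acc) _ ?_, List.foldl_fixed]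
      · rfl
      · intro acc i hi
        obtain ⟨h1, h2⟩ := PySem.List.mem_pyRange_one.mp hi
        rw [hcondE i h1 h2]
        simp [hdz]
    · -- '0' … x : A returns {'0.' + rest}, B keeps exactly the i = 1 candidate
      have hde : (d == '0') = false := by simpa using hdz
      simp only [hlen2, PySem.List.pyGetD_zero_cons, hget1, hc, hde, hok, Bool.and_self,
        Bool.not_true, Bool.not_false, Bool.and_false, Bool.false_and, Bool.and_true,
        Bool.true_and, reduceIte]
      rw [PySem.List.pyRange_one_cons hn]
      simp only [List.foldl_cons]
      rw [hcondI 1 (by norm_num) hn, hcondE 1 (by norm_num) hn]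
      simp only [hc, hde, Bool.not_true, Bool.not_false, Bool.or_false, Bool.and_true,
        BEq.rfl, Bool.true_or, Bool.true_and, reduceIte]
      rw [PySem.List.foldl_congr_mem _ _ (fun acc _ => acc) _ ?_, List.foldl_fixed]
      · have h1 : PySem.List.slice (c :: c2 :: t2) none (some 1) = [c] := by
          rw [PySem.List.slice_to _ (by norm_num)]
          simp
        rw [h1]
        rfl
      · intro acc i hi
        obtain ⟨h1, h2⟩ := PySem.List.mem_pyRange_one.mp hi
        rw [hcondI i (by omega) h2]
        have : (i == 1) = false := by simp; omega
        simp [this, hc]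
    · -- x … '0' : A returns {bare}, B keeps only the bare string
      have hce : (c == '0') = false := by simpa using hc
      simp only [hlen2, PySem.List.pyGetD_zero_cons, hget1, hce, hdz, hok, Bool.and_self,
        Bool.not_true, Bool.not_false, Bool.and_false, Bool.false_and, Bool.and_true,
        Bool.true_and, reduceIte]
      rw [PySem.List.foldl_congr_mem _ _ (fun acc _ => acc) _ ?_, List.foldl_fixed]
      · rfl
      · intro acc i hi
        obtain ⟨h1, h2⟩ := PySem.List.mem_pyRange_one.mp hi
        rw [hcondE i h1 h2]
        simp [hdz]
    · -- x … y : A returns all dotted forms plus the bare string; B keeps everything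
      have hce : (c == '0') = false := by simpa using hc
      have hde : (d == '0') = false := by simpa using hdz
      simp only [hlen2, PySem.List.pyGetD_zero_cons, hget1, hce, hde, hok, Bool.and_self,
        Bool.not_true, Bool.not_false, Bool.and_false, Bool.false_and, Bool.and_true,
        Bool.true_and, Bool.false_eq_true, reduceIte]
      rw [PySem.Set.ofList_eq_foldl, List.foldl_map]
      have key : (PySem.List.pyRange 1 ((c :: c2 :: t2).length : Int)).foldl
          (fun (acc : PySem.Set String) (i : Int) =>
            if pvOkInt (PySem.List.slice (c :: c2 :: t2) none (some i)) &&
                !PySem.Chars.endswith (PySem.List.slice (c :: c2 :: t2) (some i) none) ['0'] then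
              PySem.Set.add acc (String.ofList
                (PySem.List.slice (c :: c2 :: t2) none (some i) ++
                  '.' :: PySem.List.slice (c :: c2 :: t2) (some i) none))
            else acc) PySem.Set.empty
          = (PySem.List.pyRange 1 ((c :: c2 :: t2).length : Int)).foldl
            (fun acc i => PySem.Set.add acc (String.ofList
              (PySem.List.slice (c :: c2 :: t2) none (some i) ++
                '.' :: PySem.List.slice (c :: c2 :: t2) (some i) none))) PySem.Set.empty := by
        apply PySem.List.foldl_congr_mem
        intro acc i hi
        obtain ⟨h1, h2⟩ := PySem.List.mem_pyRange_one.mp hi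
        rw [hcondI i h1 h2, hcondE i h1 h2]
        simp [hce, hde]
      rw [key]
      rfl
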